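-- pv_equiv track=rewrite | github.com/tudormihaita/ubb-computer-science-projects | Semester 1/Computational Logic/LC-BaseConversions-ArithmeticOperations/operatii_aritmetice/operatii.py | scadere_doua_numere
-- ===== SOURCE A (Python) =====
-- to_baza16 = {
--     0: '0', 1: '1', 2: '2', 3: '3', 4: '4', 5: '5', 6: '6', 7: '7', 8: '8', 9: '9',
--     10: 'A', 11: 'B', 12: 'C', 13: 'D', 14: 'E', 15: 'F'
-- }
--
-- from_baza16 = {
--     '0': 0, '1': 1, '2': 2, '3': 3, '4': 4, '5': 5, '6': 6, '7': 7, '8': 8, '9': 9, '10': 10,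
--     'A': 10, 'B': 11, 'C': 12, 'D': 13, 'E': 14, 'F': 15, '16': 16
-- }
--
-- def scadere_doua_numere(nr1, nr2, baza):
--     """
--     realizeaza scaderea a doua numere intr-o baza oarecare data, respectand algoritmul:
--
--     Preconditie: nr1>=nr2
--     an an-1 ... a1 a0 (p) -
--     bm bm-1 ... b1 b0 (p)
--     _____________________
--     cn cn-1 ... c1 c0 (p)
--
--     i=0,n presupunem ca vom completa numarul mai scurt cu cifre de 0, t0=0
--
--     ci := p+ai-bi+ti , daca ai+ti <bi, ti+1=-1
--     ci := ai-bi+ti altfel, ti+1=0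
--
--     :param nr1: numar natural, dat sub forma de string
--     :param nr2: numar natural, dat sub forma de string
--     :param baza: baza p oarecare, 2-10 sau 16
--     :return: rezultatul scaderii celor doua numere in baza data
--     """
--     nr1 = nr1[::-1]
--     nr2 = nr2[::-1]
--     # completarea numarului mai scurt cu 0-uri
--     if len(nr1) > len(nr2):
--         lg = len(nr1) - len(nr2)
--         for i in range(lg):
--             nr2 = nr2 + '0'
--
--     lg = len(nr1)
--     rez = ""
--     imprumut = 0
--     for i in range(lg):
--         d = from_baza16[nr1[i]] - imprumut
--         d = d - from_baza16[nr2[i]]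
--         if d >= 0:
--             rez = rez + to_baza16[d]
--             imprumut = 0
--         else:
--             rez = rez + to_baza16[baza-abs(d)]
--             imprumut = 1
--
--     while rez[-1] == '0':
--         rez = rez[:-1]
--     return rez[::-1]
-- ===== SOURCE B (Python) =====
-- to_baza16 = {
--     0: '0', 1: '1', 2: '2', 3: '3', 4: '4', 5: '5', 6: '6', 7: '7', 8: '8', 9: '9',
--     10: 'A', 11: 'B', 12: 'C', 13: 'D', 14: 'E', 15: 'F'
-- }
--
-- from_baza16 = {
--     '0': 0, '1': 1, '2': 2, '3': 3, '4': 4, '5': 5, '6': 6, '7': 7, '8': 8, '9': 9, '10': 10,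
--     'A': 10, 'B': 11, 'C': 12, 'D': 13, 'E': 14, 'F': 15, '16': 16
-- }
--
-- def scadere_doua_numere(nr1, nr2, baza):
--     """Subtraction in base baza, but stateless: no borrow is carried from digit
--     to digit; instead the borrow INTO each position is recomputed from scratch
--     as a lexicographic comparison of the two lower-order digit prefixes
--     (a borrow reaches position i exactly when the low i digits of nr1 form a
--     smaller number than the low i digits of nr2)."""
--     r1 = nr1[::-1]
--     r2 = nr2[::-1]
--     if len(r2) < len(r1):
--         r2 = r2 + '0' * (len(r1) - len(r2))
--     out = ""
--     for i in range(len(r1)):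
--         d = from_baza16[r1[i]] - (1 if r1[:i][::-1] < r2[:i][::-1] else 0) - from_baza16[r2[i]]
--         out = out + (to_baza16[d] if d >= 0 else to_baza16[baza - abs(d)])
--     while out[-1] == '0':
--         out = out[:-1]
--     return out[::-1]
-- ===== Notes on version B (the rewrite author's own statement) =====
-- stated objective: alternative
-- what changed: Removes A's loop-carried borrow state: B recomputes the borrow into each digit position independently, as a lexicographic comparison of the two lower-order digit prefixes, so the digits are produced by a stateless per-position map instead of A's stateful scan propagating imprumut.
-- outside the precondition, e.g. on scadere_doua_numere('10', '05', 17): A returns 'C', B returns 'C'; on scadere_doua_numere('51', '14', 4): A returns '31', B returns '31'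
import Mathlib
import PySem

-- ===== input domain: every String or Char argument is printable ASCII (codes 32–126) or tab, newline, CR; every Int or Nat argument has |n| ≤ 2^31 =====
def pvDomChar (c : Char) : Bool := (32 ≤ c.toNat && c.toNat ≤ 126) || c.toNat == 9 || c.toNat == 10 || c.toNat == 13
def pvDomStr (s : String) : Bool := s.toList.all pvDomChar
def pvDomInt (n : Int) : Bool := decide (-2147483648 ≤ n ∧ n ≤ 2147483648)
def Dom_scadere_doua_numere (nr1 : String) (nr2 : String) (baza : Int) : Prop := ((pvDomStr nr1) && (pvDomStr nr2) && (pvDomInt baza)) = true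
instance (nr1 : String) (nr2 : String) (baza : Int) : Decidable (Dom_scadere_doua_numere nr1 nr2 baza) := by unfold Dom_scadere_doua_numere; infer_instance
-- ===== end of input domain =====

-- B removes A's loop-carried borrow state: the borrow into each digit position is recomputed
-- independently as a lexicographic comparison of the two lower-order digit prefixes, turning the
-- stateful scan into a stateless map over positions; objective: alternative (not faster).

-- ===== PORT A =====
-- from_baza16[c] for a single character c (the dict's two-character keys '10'/'16' can never
-- match one char); the default 0 is the KeyError case, excluded by Pre_.
def fromB16 (c : Char) : Int :=
  if c = '0' then 0 else if c = '1' then 1 else if c = '2' then 2 else if c = '3' then 3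
  else if c = '4' then 4 else if c = '5' then 5 else if c = '6' then 6 else if c = '7' then 7
  else if c = '8' then 8 else if c = '9' then 9 else if c = 'A' then 10 else if c = 'B' then 11
  else if c = 'C' then 12 else if c = 'D' then 13 else if c = 'E' then 14 else if c = 'F' then 15
  else 0

-- to_baza16[d]; the default '0' is the KeyError case (key outside 0..15), excluded by Pre_.
def toB16 (d : Int) : Char :=
  if d = 0 then '0' else if d = 1 then '1' else if d = 2 then '2' else if d = 3 then '3'
  else if d = 4 then '4' else if d = 5 then '5' else if d = 6 then '6' else if d = 7 then '7'
  else if d = 8 then '8' else if d = 9 then '9' else if d = 10 then 'A' else if d = 11 then 'B'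
  else if d = 12 then 'C' else if d = 13 then 'D' else if d = 14 then 'E' else if d = 15 then 'F'
  else '0'

-- A's main for-loop over i in range(lg): reads nr1[i] and nr2[i] in lockstep (= the zipped
-- pairs; the zip truncates exactly as the loop bound lg = len(nr1) does when nr2 is longer),
-- carrying the accumulated rez string and the borrow imprumut.
def loopA (baza : Int) : List (Char × Char) → List Char → Int → List Char
  | [], rez, _ => rez
  | (x, y) :: ps, rez, imprumut =>
      let d := fromB16 x - imprumut - fromB16 y
      if 0 ≤ d then loopA baza ps (rez ++ [toB16 d]) 0
      else loopA baza ps (rez ++ [toB16 (baza - |d|)]) 1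

-- `while rez[-1] == '0': rez = rez[:-1]`; on [] Python raises IndexError (excluded by Pre_).
def stripZ (l : List Char) : List Char :=
  if _h : l.getLast? = some '0' then stripZ l.dropLast else l
termination_by l.length
decreasing_by
  have hne : l ≠ [] := by intro hnil; simp [hnil] at _h
  have := List.length_pos_of_ne_nil hne
  simp [List.length_dropLast]; omega

def scadere_doua_numere (nr1 : String) (nr2 : String) (baza : Int) : String :=
  let r1 := nr1.toList.reverse
  let r2 := nr2.toList.reverse
  let r2 := if r1.length > r2.length then r2 ++ List.replicate (r1.length - r2.length) '0' else r2
  let rez := loopA baza (r1.zip r2) [] 0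
  String.mk (stripZ rez).reverse

-- ===== PORT B =====
-- Python's '<' on strings: code-point lexicographic comparison (exact for all Char).
def pyStrLt : List Char → List Char → Bool
  | [], [] => false
  | [], _ :: _ => true
  | _ :: _, [] => false
  | x :: xs, y :: ys =>
      if x.toNat < y.toNat then true
      else if y.toNat < x.toNat then false
      else pyStrLt xs ys

-- the loop body of B for one position i: r1[i], r2[i] (in range for i < len(r1) ≤ len(r2)),
-- the borrow recomputed as the prefix comparison r1[:i][::-1] < r2[:i][::-1]
def digitB (baza : Int) (r1 r2 : List Char) (i : Nat) : Char :=
  let d := fromB16 (PySem.List.pyGetD r1 (i : Int) ' ')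
    - (if pyStrLt ((r1.take i).reverse) ((r2.take i).reverse) then 1 else 0)
    - fromB16 (PySem.List.pyGetD r2 (i : Int) ' ')
  if 0 ≤ d then toB16 d else toB16 (baza - |d|)

def scadere_doua_numere_alt (nr1 : String) (nr2 : String) (baza : Int) : String :=
  let r1 := nr1.toList.reverse
  let r2 := nr2.toList.reverse
  let r2 := if r2.length < r1.length then r2 ++ List.replicate (r1.length - r2.length) '0' else r2
  let out := (List.range r1.length).map (digitB baza r1 r2)
  String.mk (stripZ out).reverse

-- ===== PRECONDITION & SPEC =====
def hexChars : List Char := ['0','1','2','3','4','5','6','7','8','9','A','B','C','D','E','F']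

-- Pre_ = a closed-form region where the Python A returns normally: every digit A reads is a
-- hex character, the digit-wise result is not all zeros (A's final strip raises IndexError on an
-- all-zero result, which happens exactly when the read digits of nr1 and nr2 agree position by
-- position), and the to_baza16 borrow lookup stays inside 0..15 — guaranteed either by a proper
-- base (2 ≤ baza ≤ 16 with the read digits of nr2 below baza) or by no position needing a borrow
-- (then baza is never consulted).  It conservatively excludes borrow cases with an out-of-range
-- base or subtrahend digits ≥ baza, where A usually raises KeyError but occasionally returns.
def Pre_scadere_doua_numere (nr1 : String) (nr2 : String) (baza : Int) : Prop :=
  nr1.toList.all (fun c => hexChars.contains c) = true ∧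
  (nr2.toList.reverse.take nr1.toList.length).all (fun c => hexChars.contains c) = true ∧
  ¬((nr1.toList.reverse.zip nr2.toList.reverse).all
      (fun p => fromB16 p.1 == fromB16 p.2) = true ∧
    (nr1.toList.reverse.drop nr2.toList.length).all (fun c => fromB16 c == 0) = true) ∧
  ((2 ≤ baza ∧ baza ≤ 16 ∧
      (nr2.toList.reverse.take nr1.toList.length).all (fun c => decide (fromB16 c < baza)) = true) ∨
   (nr1.toList.reverse.zip nr2.toList.reverse).all
      (fun p => decide (fromB16 p.2 ≤ fromB16 p.1)) = true)

instance (nr1 : String) (nr2 : String) (baza : Int) : Decidable (Pre_scadere_doua_numere nr1 nr2 baza) := by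
  unfold Pre_scadere_doua_numere; infer_instance

def pvWitness_scadere_doua_numere : String × String × Int := ("10", "1", 2)

def Spec_scadere_doua_numere (nr1 : String) (nr2 : String) (baza : Int) (out : String) : Prop := out = scadere_doua_numere_alt nr1 nr2 baza
instance (nr1 : String) (nr2 : String) (baza : Int) (out : String) : Decidable (Spec_scadere_doua_numere nr1 nr2 baza out) := by unfold Spec_scadere_doua_numere; infer_instance

-- ===== CLAIM (what is proved, stated in full; the proofs are below) =====
def Claim_equal_scadere_doua_numere : Prop := ∀ (nr1 : String) (nr2 : String) (baza : Int), Dom_scadere_doua_numere nr1 nr2 baza → Pre_scadere_doua_numere nr1 nr2 baza → Spec_scadere_doua_numere nr1 nr2 baza (scadere_doua_numere nr1 nr2 baza)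

-- ===== LEMMAS AND PROOFS =====

-- on hex characters the code-point order IS the digit-value order
set_option maxHeartbeats 1000000 in
theorem hexLt {c d : Char} (hc : c ∈ hexChars) (hd : d ∈ hexChars) :
    c.toNat < d.toNat ↔ fromB16 c < fromB16 d := by
  fin_cases hc <;> fin_cases hd <;> decide

theorem loopA_acc (baza : Int) (ps : List (Char × Char)) :
    ∀ (rez : List Char) (t : Int), loopA baza ps rez t = rez ++ loopA baza ps [] t := by
  induction ps with
  | nil => intro rez t; simp [loopA]
  | cons p ps ih =>
      intro rez t
      obtain ⟨x, y⟩ := p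
      simp only [loopA]
      split_ifs with h
      · rw [ih (rez ++ [toB16 _]), ih ([] ++ [toB16 _])]; simp
      · rw [ih (rez ++ [toB16 _]), ih ([] ++ [toB16 _])]; simp

theorem loopA_cons (baza : Int) (x y : Char) (ps : List (Char × Char)) (t : Int) :
    loopA baza ((x, y) :: ps) [] t =
      if 0 ≤ fromB16 x - t - fromB16 y
      then toB16 (fromB16 x - t - fromB16 y) :: loopA baza ps [] 0
      else toB16 (baza - |fromB16 x - t - fromB16 y|) :: loopA baza ps [] 1 := by
  simp only [loopA]
  split_ifs with h
  · rw [loopA_acc]; simp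
  · rw [loopA_acc]; simp

-- B's borrow into position k
def tB (r1 r2 : List Char) (k : Nat) : Int :=
  if pyStrLt ((r1.take k).reverse) ((r2.take k).reverse) then 1 else 0

-- the prefix-comparison borrow obeys exactly the step rule of A's carried borrow
theorem tB_succ (r1 r2 : List Char) (k : Nat) (hk1 : k < r1.length) (hk2 : k < r2.length)
    (hx : r1[k] ∈ hexChars) (hy : r2[k] ∈ hexChars) :
    tB r1 r2 (k+1) = if 0 ≤ fromB16 r1[k] - tB r1 r2 k - fromB16 r2[k] then 0 else 1 := by
  have h1 : r1.take (k+1) = r1.take k ++ [r1[k]] := by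
    rw [List.take_succ]; simp [List.getElem?_eq_getElem hk1]
  have h2 : r2.take (k+1) = r2.take k ++ [r2[k]] := by
    rw [List.take_succ]; simp [List.getElem?_eq_getElem hk2]
  unfold tB
  rw [h1, h2, List.reverse_append, List.reverse_append]
  simp only [List.reverse_singleton, List.singleton_append]
  rcases Nat.lt_trichotomy (r1[k].toNat) (r2[k].toNat) with h | h | h
  · have hv : fromB16 r1[k] < fromB16 r2[k] := (hexLt hx hy).mp h
    have hps : pyStrLt (r1[k] :: (r1.take k).reverse) (r2[k] :: (r2.take k).reverse) = true := by
      simp [pyStrLt, h]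
    rw [hps]
    by_cases hb : pyStrLt ((r1.take k).reverse) ((r2.take k).reverse) <;>
      simp only [hb, Bool.false_eq_true, reduceIte] <;>
      split_ifs <;> omega
  · have hv1 : ¬ fromB16 r1[k] < fromB16 r2[k] := by rw [← hexLt hx hy]; omega
    have hv2 : ¬ fromB16 r2[k] < fromB16 r1[k] := by rw [← hexLt hy hx]; omega
    have hps : pyStrLt (r1[k] :: (r1.take k).reverse) (r2[k] :: (r2.take k).reverse)
        = pyStrLt ((r1.take k).reverse) ((r2.take k).reverse) := by
      simp [pyStrLt, h]
    rw [hps]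
    by_cases hb : pyStrLt ((r1.take k).reverse) ((r2.take k).reverse) <;>
      simp only [hb, Bool.false_eq_true, reduceIte] <;>
      split_ifs <;> omega
  · have hv : fromB16 r2[k] < fromB16 r1[k] := (hexLt hy hx).mp h
    have hps : pyStrLt (r1[k] :: (r1.take k).reverse) (r2[k] :: (r2.take k).reverse) = false := by
      simp [pyStrLt]; omega
    rw [hps]
    by_cases hb : pyStrLt ((r1.take k).reverse) ((r2.take k).reverse) <;>
      simp only [hb, Bool.false_eq_true, reduceIte] <;>
      split_ifs <;> omega

-- the whole loop: A's stateful scan from position k with borrow tB k equals B's stateless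
-- per-position map over the remaining positions
theorem chain (baza : Int) (r1 r2 : List Char) (hlen : r1.length ≤ r2.length)
    (h1 : ∀ c ∈ r1, c ∈ hexChars) (h2 : ∀ c ∈ r2.take r1.length, c ∈ hexChars) :
    ∀ (m k : Nat), k + m = r1.length →
    loopA baza ((r1.zip r2).drop k) [] (tB r1 r2 k)
      = (List.range' k m).map (digitB baza r1 r2) := by
  intro m
  induction m with
  | zero =>
      intro k hk
      rw [List.drop_of_length_le (by simp [List.length_zip]; omega)]
      simp [loopA]
  | succ m ih =>
      intro k hk
      have hk1 : k < r1.length := by omega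
      have hk2 : k < r2.length := by omega
      have hzip : k < (r1.zip r2).length := by simp [List.length_zip]; omega
      have hx : r1[k] ∈ hexChars := h1 _ (List.getElem_mem hk1)
      have hy : r2[k] ∈ hexChars := by
        have hgt : (r2.take r1.length)[k]'(by simp; omega) = r2[k] := by
          simp [List.getElem_take]
        exact hgt ▸ h2 _ (List.getElem_mem (by simp; omega))
      have hdrop : (r1.zip r2).drop k = (r1[k], r2[k]) :: (r1.zip r2).drop (k+1) := by
        rw [List.drop_eq_getElem_cons hzip, List.getElem_zip]
      have hdigit : digitB baza r1 r2 k =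
          if 0 ≤ fromB16 r1[k] - tB r1 r2 k - fromB16 r2[k]
          then toB16 (fromB16 r1[k] - tB r1 r2 k - fromB16 r2[k])
          else toB16 (baza - |fromB16 r1[k] - tB r1 r2 k - fromB16 r2[k]|) := by
        unfold digitB tB
        rw [PySem.List.pyGetD_natCast, PySem.List.pyGetD_natCast,
          List.getD_eq_getElem r1 ' ' hk1, List.getD_eq_getElem r2 ' ' hk2]
      have hstep := tB_succ r1 r2 k hk1 hk2 hx hy
      rw [hdrop, loopA_cons, List.range'_succ, List.map_cons, hdigit]
      split_ifs with hcond
      · have ht : tB r1 r2 (k+1) = 0 := by rw [hstep, if_pos hcond]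
        rw [← ht]
        exact congrArg _ (ih (k+1) (by omega))
      · have ht : tB r1 r2 (k+1) = 1 := by rw [hstep, if_neg hcond]
        rw [← ht]
        exact congrArg _ (ih (k+1) (by omega))

-- ===== VERDICT (by name: the statement is the Claim_ definition above) =====
theorem scadere_doua_numere_spec : Claim_equal_scadere_doua_numere := by
  intro nr1 nr2 baza _ hpre
  obtain ⟨hhex1, hhex2, _, _⟩ := hpre
  unfold Spec_scadere_doua_numere scadere_doua_numere scadere_doua_numere_alt
  simp only []
  set r1 := nr1.toList.reverse with hr1
  set r2 := nr2.toList.reverse with hr2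
  set r2p := if r2.length < r1.length
    then r2 ++ List.replicate (r1.length - r2.length) '0' else r2 with hr2p
  have hlen1 : r1.length = nr1.toList.length := by rw [hr1]; simp
  have hlen : r1.length ≤ r2p.length := by
    rw [hr2p]; split_ifs with h
    · simp; omega
    · omega
  have h1 : ∀ c ∈ r1, c ∈ hexChars := by
    intro c hc
    have := List.all_eq_true.mp hhex1 c (List.mem_reverse.mp hc)
    simpa [List.contains_iff_mem] using this
  have h2 : ∀ c ∈ r2p.take r1.length, c ∈ hexChars := by
    intro c hc
    have hbase : ∀ x ∈ r2.take r1.length, x ∈ hexChars := by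
      intro x hxm
      rw [hlen1] at hxm
      have := List.all_eq_true.mp hhex2 x hxm
      simpa [List.contains_iff_mem] using this
    rw [hr2p] at hc
    split_ifs at hc with h
    · rw [List.take_append] at hc
      rcases List.mem_append.mp hc with hm | hm
      · exact hbase c hm
      · have := List.eq_of_mem_replicate (List.mem_of_mem_take hm)
        rw [this]; decide
    · exact hbase c hc
  have hzero : tB r1 r2p 0 = 0 := by simp [tB, pyStrLt]
  have hmain := chain baza r1 r2p hlen h1 h2 r1.length 0 (by omega)
  rw [List.drop_zero, hzero] at hmain
  rw [hmain, ← List.range_eq_range']
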